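-- pv_equiv track=rewrite | github.com/vZyx/Python-notes | 12_lists/homework/17/04_2_2nested.py | count_increasing
-- ===== SOURCE A (Python) =====
-- def count_increasing(lst):
--     total = 0
--
--     # for every index idx1 in the array we consider it as the start of a sublist
--     for idx1 in range(len(lst)):
--         total += 1  # lst of len 1
--
--         for idx2 in range(idx1+1, len(lst)):
--             if lst[idx2] >= lst[idx2-1]: # is still increasing with a new element? Add 1
--                 total += 1
--             else:
--                 break   # not increasing any more. Try a new start by idx1
--
--     return total
-- ===== SOURCE B (Python) =====
-- def count_increasing(lst):
--     # Backward DP: f = length of the maximal non-decreasing run starting at i;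
--     # each start i contributes exactly f sublists, so summing f gives A's count in O(n).
--     total = 0
--     f = 0
--     n = len(lst)
--     for i in range(n - 1, -1, -1):
--         if i + 1 < n and lst[i] <= lst[i + 1]:
--             f += 1
--         else:
--             f = 1
--         total += f
--     return total
-- ===== Notes on version B (the rewrite author's own statement) =====
-- stated objective: faster
-- what changed: Replaced the nested scan (for each start, walk forward until the run breaks) by a single backward pass that maintains the length of the non-decreasing run starting at each index and sums these lengths.
import Mathlib
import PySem

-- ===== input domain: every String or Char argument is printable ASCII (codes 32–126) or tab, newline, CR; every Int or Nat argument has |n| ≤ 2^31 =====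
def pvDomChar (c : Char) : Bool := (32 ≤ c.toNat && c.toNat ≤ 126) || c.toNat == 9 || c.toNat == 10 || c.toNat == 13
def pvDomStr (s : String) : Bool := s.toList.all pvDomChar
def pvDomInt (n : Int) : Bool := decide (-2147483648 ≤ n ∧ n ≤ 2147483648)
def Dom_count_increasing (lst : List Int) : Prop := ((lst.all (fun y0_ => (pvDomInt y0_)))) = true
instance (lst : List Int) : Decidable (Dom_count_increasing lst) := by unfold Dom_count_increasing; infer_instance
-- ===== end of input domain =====

-- B replaces A's nested per-start scan by one backward pass summing non-decreasing run lengths (asymptotically faster).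


-- ===== PORT A =====
-- inner 'for idx2 in range(idx1+1, len(lst))' loop with its break: adds 1 per
-- consecutive idx2 with lst[idx2] >= lst[idx2-1], stops at the first failure.
def count_increasing_inner (lst : List Int) : List Int → Int
  | [] => 0
  | idx2 :: rest =>
    if PySem.List.pyGetD lst (idx2 - 1) 0 ≤ PySem.List.pyGetD lst idx2 0 then
      1 + count_increasing_inner lst rest
    else 0

def count_increasing (lst : List Int) : Int :=
  (PySem.List.pyRange 0 lst.length 1).foldl
    (fun total idx1 =>
      (total + 1) + count_increasing_inner lst (PySem.List.pyRange (idx1 + 1) lst.length 1))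
    0

-- ===== PORT B =====
-- backward loop of Source B as structural recursion from the right end:
-- returns (total so far, f = run length starting at the head).
def count_increasing_runs : List Int → Int × Int
  | [] => (0, 0)
  | x :: xs =>
    let p := count_increasing_runs xs
    let f : Int :=
      match xs with
      | [] => 1
      | y :: _ => if x ≤ y then p.2 + 1 else 1
    (p.1 + f, f)

def count_increasing_alt (lst : List Int) : Int :=
  (count_increasing_runs lst).1

-- ===== PRECONDITION & SPEC =====
def Spec_count_increasing (lst : List Int) (out : Int) : Prop := out = count_increasing_alt lst
instance (lst : List Int) (out : Int) : Decidable (Spec_count_increasing lst out) := by unfold Spec_count_increasing; infer_instance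

-- ===== CLAIM (what is proved, stated in full; the proofs are below) =====
def Claim_equal_count_increasing : Prop := ∀ (lst : List Int), Dom_count_increasing lst → Spec_count_increasing lst (count_increasing lst)

-- ===== LEMMAS AND PROOFS =====

-- A's per-start contribution (the 1 plus the inner loop's count) equals B's run length at that start.
theorem inner_eq_run (lst : List Int) :
    ∀ (d i : Nat), lst.length - i = d → i < lst.length →
    1 + count_increasing_inner lst (PySem.List.pyRange ((i : Int) + 1) lst.length 1)
      = (count_increasing_runs (lst.drop i)).2 := by
  intro d
  induction d with
  | zero => intro i hd hi; omega
  | succ d ih =>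
    intro i hd hi
    by_cases h1 : i + 1 < lst.length
    · rw [PySem.List.pyRange_one_cons (by omega)]
      rw [List.drop_eq_getElem_cons hi, List.drop_eq_getElem_cons h1]
      have hg1 : PySem.List.pyGetD lst ((i : Int) + 1 - 1) 0 = lst[i] := by
        rw [show (i : Int) + 1 - 1 = (i : Int) by ring, PySem.List.pyGetD_natCast]
        simp [List.getElem?_eq_getElem hi]
      have hg2 : PySem.List.pyGetD lst ((i : Int) + 1) 0 = lst[i+1] := by
        rw [show (i : Int) + 1 = ((i + 1 : Nat) : Int) by push_cast; ring,
          PySem.List.pyGetD_natCast]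
        simp [List.getElem?_eq_getElem h1]
      have := ih (i + 1) (by omega) h1
      rw [List.drop_eq_getElem_cons h1] at this
      simp only [count_increasing_inner, count_increasing_runs, hg1, hg2]
      rw [show ((i : Int) + 1) + 1 = ((i + 1 : Nat) : Int) + 1 by push_cast; ring]
      split_ifs with hle
      · simp only [count_increasing_runs] at this
        omega
      · rfl
    · have hlen : lst.length = i + 1 := by omega
      rw [PySem.List.pyRange_one_eq_nil (by omega)]
      have hnil : lst.drop (i + 1) = [] := List.drop_eq_nil_of_le (by omega)
      have hdrop : lst.drop i = [lst[i]] := by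
        rw [List.drop_eq_getElem_cons hi, hnil]
      rw [hdrop]
      simp [count_increasing_inner, count_increasing_runs]

theorem runs_cons_fst (x : Int) (xs : List Int) :
    (count_increasing_runs (x :: xs)).1
      = (count_increasing_runs xs).1 + (count_increasing_runs (x :: xs)).2 := by
  cases xs <;> simp [count_increasing_runs]

-- B's total is the sum of its run lengths over all starting positions.
theorem runs_total (lst : List Int) :
    (count_increasing_runs lst).1
      = ((List.range lst.length).map (fun i => (count_increasing_runs (lst.drop i)).2)).sum := by
  induction lst with
  | nil => simp [count_increasing_runs]
  | cons x xs ih =>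
    rw [List.length_cons, List.range_succ_eq_map, List.map_cons, List.map_map,
      List.sum_cons, List.drop_zero]
    have h2 : (List.range xs.length).map
        ((fun i => (count_increasing_runs ((x :: xs).drop i)).2) ∘ Nat.succ)
        = (List.range xs.length).map (fun i => (count_increasing_runs (xs.drop i)).2) := by
      apply List.map_congr_left
      intro k _
      simp [Function.comp, List.drop_succ_cons]
    rw [h2, ← ih, runs_cons_fst, add_comm]

theorem count_increasing_eq_alt (lst : List Int) :
    count_increasing lst = count_increasing_alt lst := by
  unfold count_increasing count_increasing_alt
  have hfun : (fun (total idx1 : Int) =>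
      (total + 1) + count_increasing_inner lst (PySem.List.pyRange (idx1 + 1) lst.length 1))
      = fun total idx1 => total +
        (1 + count_increasing_inner lst (PySem.List.pyRange (idx1 + 1) lst.length 1)) := by
    funext t i; ring
  rw [hfun, PySem.List.foldl_add, PySem.List.pyRange_zero_nat, List.map_map, zero_add,
    runs_total]
  congr 1
  apply List.map_congr_left
  intro k hk
  simp only [Function.comp]
  exact inner_eq_run lst (lst.length - k) k rfl (List.mem_range.mp hk)

-- ===== VERDICT (by name: the statement is the Claim_ definition above) =====
theorem count_increasing_spec : Claim_equal_count_increasing := by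
  intro lst _
  unfold Spec_count_increasing
  exact count_increasing_eq_alt lst
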